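-- pv_equiv track=rewrite | github.com/Unka-Malloc/pandas-sdql.py | pysdql/query/util.py | exists_duplicates
-- ===== SOURCE A (Python) =====
-- def exists_duplicates(test_str: str):
--     i = 0
--
--     for j in range(len(test_str)):
--         if test_str[i:j] == test_str[j:j + j - i]:
--             singleton = test_str[i:j]
--             if len(singleton.strip()) > 0:
--                 return True
--     else:
--         return False
-- ===== SOURCE B (Python) =====
-- def exists_duplicates(test_str: str):
--     n = len(test_str)
--     f = -1
--     for i in range(n):
--         if not test_str[i].isspace():
--             f = i
--             break
--     if f < 0:
--         return False
--     base = 1000003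
--     mod = 2305843009213693951
--     h = [0]
--     p = [1]
--     for c in test_str:
--         h.append((h[-1] * base + ord(c)) % mod)
--         p.append((p[-1] * base) % mod)
--     for j in range(f + 1, n // 2 + 1):
--         if (h[j] - h[0] * p[j]) % mod == (h[2 * j] - h[j] * p[j]) % mod and test_str[:j] == test_str[j:2 * j]:
--             return True
--     return False
-- ===== Notes on version B (the rewrite author's own statement) =====
-- stated objective: faster
-- what changed: Replaces A's per-j slice-and-strip comparison (each O(j)) with a precomputed first-non-whitespace index and precomputed rolling prefix hashes so each candidate j is filtered in O(1), with an exact slice comparison only on hash match.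
import Mathlib
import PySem

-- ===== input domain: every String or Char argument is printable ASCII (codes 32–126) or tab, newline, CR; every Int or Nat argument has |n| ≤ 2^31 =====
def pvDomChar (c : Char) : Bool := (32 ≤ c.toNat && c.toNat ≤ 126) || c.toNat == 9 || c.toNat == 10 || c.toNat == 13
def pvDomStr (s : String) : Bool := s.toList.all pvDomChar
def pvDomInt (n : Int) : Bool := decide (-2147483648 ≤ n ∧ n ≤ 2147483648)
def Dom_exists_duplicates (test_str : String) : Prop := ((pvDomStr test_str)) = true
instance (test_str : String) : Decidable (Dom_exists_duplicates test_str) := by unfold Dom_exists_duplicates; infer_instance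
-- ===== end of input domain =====

-- B replaces A's per-j slice comparison with precomputed rolling prefix hashes (O(1) filter per j,
-- exact slice check only on hash match) and a precomputed first-non-whitespace index; return value only, no side effects.

-- ===== PORT A =====
-- the early-return 'for j in range(len(test_str)): …' loop of A
def pvALoop (ts : List Char) (i : Int) : List Int → Bool
  | [] => false
  | j :: rest =>
    if PySem.List.slice ts (some i) (some j) = PySem.List.slice ts (some j) (some (j + j - i)) then
      -- singleton = test_str[i:j]
      if 0 < PySem.Chars.len (PySem.Chars.strip (PySem.List.slice ts (some i) (some j))) then true
      else pvALoop ts i rest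
    else pvALoop ts i rest

def exists_duplicates (test_str : String) : Bool :=
  let i : Int := 0
  pvALoop test_str.toList i (PySem.List.pyRange 0 (test_str.toList.length : Int) 1)

-- ===== PORT B =====
-- 'for i in range(n): if not test_str[i].isspace(): f = i; break' (f = -1 when the loop finishes)
def pvBFindF (ts : List Char) : List Int → Int
  | [] => -1
  | i :: rest =>
    if !(PySem.Chars.isspace (PySem.List.pyGetD ts i ' ')) then i
    else pvBFindF ts rest

-- 'for c in test_str: h.append((h[-1]*base + ord(c)) % mod); p.append((p[-1]*base) % mod)'
def pvBBuild (base m : Int) : List Char → List Int × List Int → List Int × List Int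
  | [], st => st
  | c :: cs, (h, p) =>
    pvBBuild base m cs
      (h ++ [PySem.Int.mod (PySem.List.pyGetD h (-1) 0 * base + (c.toNat : Int)) m],
       p ++ [PySem.Int.mod (PySem.List.pyGetD p (-1) 0 * base) m])

-- 'for j in range(f+1, n//2+1): if <hashes equal> and test_str[:j] == test_str[j:2*j]: return True'
def pvBLoop (ts : List Char) (h p : List Int) (m : Int) : List Int → Bool
  | [] => false
  | j :: rest =>
    if PySem.Int.mod (PySem.List.pyGetD h j 0 - PySem.List.pyGetD h 0 0 * PySem.List.pyGetD p j 0) m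
         = PySem.Int.mod (PySem.List.pyGetD h (2 * j) 0 - PySem.List.pyGetD h j 0 * PySem.List.pyGetD p j 0) m
       ∧ PySem.List.slice ts none (some j) = PySem.List.slice ts (some j) (some (2 * j)) then true
    else pvBLoop ts h p m rest

def exists_duplicates_alt (test_str : String) : Bool :=
  let ts := test_str.toList
  let n : Int := ts.length
  let f := pvBFindF ts (PySem.List.pyRange 0 n 1)
  if f < 0 then false
  else
    let base : Int := 1000003
    let m : Int := 2305843009213693951
    let hp := pvBBuild base m ts ([0], [1])
    pvBLoop ts hp.1 hp.2 m (PySem.List.pyRange (f + 1) (PySem.Int.floordiv n 2 + 1) 1)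

-- ===== PRECONDITION & SPEC =====
def Spec_exists_duplicates (test_str : String) (out : Bool) : Prop := out = exists_duplicates_alt test_str
instance (test_str : String) (out : Bool) : Decidable (Spec_exists_duplicates test_str out) := by unfold Spec_exists_duplicates; infer_instance

-- ===== CLAIM (what is proved, stated in full; the proofs are below) =====
def Claim_equal_exists_duplicates : Prop := ∀ (test_str : String), Dom_exists_duplicates test_str → Spec_exists_duplicates test_str (exists_duplicates test_str)

-- ===== LEMMAS AND PROOFS =====

-- mod-reduced rolling hash continuation, unreduced hash, and the power table values
def pvG (base m x : Int) (u : List Char) : Int :=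
  u.foldl (fun a c => PySem.Int.mod (a * base + (c.toNat : Int)) m) x

def pvN (base x : Int) (u : List Char) : Int :=
  u.foldl (fun a c => a * base + (c.toNat : Int)) x

def pvQa (base m y : Int) : Nat → Int
  | 0 => y
  | k + 1 => pvQa base m (PySem.Int.mod (y * base) m) k

def pvContH (base m x : Int) : List Char → List Int
  | [] => []
  | c :: cs => PySem.Int.mod (x * base + (c.toNat : Int)) m ::
      pvContH base m (PySem.Int.mod (x * base + (c.toNat : Int)) m) cs

def pvContP (base m y : Int) : Nat → List Int
  | 0 => []
  | k + 1 => PySem.Int.mod (y * base) m :: pvContP base m (PySem.Int.mod (y * base) m) k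

lemma pvBBuild_eq (base m : Int) (cs : List Char) : ∀ (h p : List Int) (x y : Int),
    pvBBuild base m cs (h ++ [x], p ++ [y]) =
      (h ++ [x] ++ pvContH base m x cs, p ++ [y] ++ pvContP base m y cs.length) := by
  induction cs with
  | nil => intro h p x y; simp [pvBBuild, pvContH, pvContP]
  | cons c cs ih =>
      intro h p x y
      simp only [pvBBuild, PySem.List.pyGetD_neg_one_append_singleton]
      rw [ih (h ++ [x]) (p ++ [y])]
      simp [pvContH, pvContP, List.append_assoc]

lemma pvContH_getD (base m : Int) (cs : List Char) : ∀ (x : Int) (k : Nat), k ≤ cs.length →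
    (x :: pvContH base m x cs).getD k 0 = pvG base m x (cs.take k) := by
  induction cs with
  | nil => intro x k hk; simp at hk; subst hk; simp [pvContH, pvG]
  | cons c cs ih =>
      intro x k hk
      cases k with
      | zero => simp [pvG]
      | succ k =>
          simp only [List.getD_cons_succ, pvContH]
          rw [ih _ k (by simpa using hk)]
          simp [pvG]

lemma pvContP_getD (base m : Int) (n : Nat) : ∀ (y : Int) (k : Nat), k ≤ n →
    (y :: pvContP base m y n).getD k 0 = pvQa base m y k := by
  induction n with
  | zero => intro y k hk; simp at hk; subst hk; simp [pvContP, pvQa]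
  | succ n ih =>
      intro y k hk
      cases k with
      | zero => simp [pvQa]
      | succ k =>
          simp only [List.getD_cons_succ, pvContP]
          rw [ih _ k (by omega)]
          simp [pvQa]

lemma pvN_split (base : Int) (u : List Char) : ∀ x, pvN base x u = x * base ^ u.length + pvN base 0 u := by
  induction u with
  | nil => intro x; simp [pvN]
  | cons c u ih =>
      intro x
      show pvN base (x * base + (c.toNat : Int)) u = x * base ^ (u.length + 1) + pvN base (0 * base + (c.toNat : Int)) u
      rw [ih (x * base + (c.toNat : Int)), ih (0 * base + (c.toNat : Int))]
      ring

lemma pvG_modeq (base m : Int) (hm : 0 < m) (u : List Char) : ∀ x, pvG base m x u ≡ pvN base x u [ZMOD m] := by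
  induction u with
  | nil => intro x; rfl
  | cons c u ih =>
      intro x
      show pvG base m (PySem.Int.mod (x * base + (c.toNat : Int)) m) u ≡ pvN base (x * base + (c.toNat : Int)) u [ZMOD m]
      have hx : PySem.Int.mod (x * base + (c.toNat : Int)) m ≡ x * base + (c.toNat : Int) [ZMOD m] := by
        rw [PySem.Int.mod_eq_emod_of_pos hm]
        exact Int.emod_emod_of_dvd _ dvd_rfl
      calc pvG base m (PySem.Int.mod (x * base + (c.toNat : Int)) m) u
          ≡ pvN base (PySem.Int.mod (x * base + (c.toNat : Int)) m) u [ZMOD m] := ih _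
        _ ≡ pvN base (x * base + (c.toNat : Int)) u [ZMOD m] := by
            rw [pvN_split base u, pvN_split base u (x * base + (c.toNat : Int))]
            exact ((hx.mul_right _).add_right _)

lemma pvQa_modeq (base m : Int) (hm : 0 < m) (k : Nat) : ∀ y, pvQa base m y k ≡ y * base ^ k [ZMOD m] := by
  induction k with
  | zero => intro y; simp only [pvQa, pow_zero, mul_one]; exact Int.ModEq.refl y
  | succ k ih =>
      intro y
      have hy : PySem.Int.mod (y * base) m ≡ y * base [ZMOD m] := by
        rw [PySem.Int.mod_eq_emod_of_pos hm]
        exact Int.emod_emod_of_dvd _ dvd_rfl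
      calc pvQa base m (PySem.Int.mod (y * base) m) k
          ≡ PySem.Int.mod (y * base) m * base ^ k [ZMOD m] := ih _
        _ ≡ (y * base) * base ^ k [ZMOD m] := hy.mul_right _
        _ = y * base ^ (k + 1) := by ring

lemma pv_sub_eq (base m : Int) (hm : 0 < m) (s u : List Char) :
    PySem.Int.mod (pvG base m 0 (s ++ u) - pvG base m 0 s * pvQa base m 1 u.length) m
      = PySem.Int.mod (pvN base 0 u) m := by
  have h1 : pvG base m 0 (s ++ u) = pvG base m (pvG base m 0 s) u := by
    simp [pvG, List.foldl_append]
  set x := pvG base m 0 s with hx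
  have h2 : pvG base m x u ≡ x * base ^ u.length + pvN base 0 u [ZMOD m] := by
    have := pvG_modeq base m hm u x
    rwa [pvN_split base u x] at this
  have h3 : pvQa base m 1 u.length ≡ base ^ u.length [ZMOD m] := by
    simpa using pvQa_modeq base m hm u.length 1
  have key : pvG base m 0 (s ++ u) - x * pvQa base m 1 u.length ≡ pvN base 0 u [ZMOD m] := by
    rw [h1]
    have := h2.sub (h3.mul_left x)
    have e : x * base ^ u.length + pvN base 0 u - x * base ^ u.length = pvN base 0 u := by ring
    rwa [e] at this
  rw [PySem.Int.mod_eq_emod_of_pos hm, PySem.Int.mod_eq_emod_of_pos hm]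
  exact key

-- strip is nonempty iff some character is not whitespace
lemma pv_strip_pos (u : List Char) :
    0 < (PySem.Chars.strip u).length ↔ ∃ c ∈ u, ¬ PySem.Chars.isspace c := by
  have h : PySem.Chars.strip u = [] ↔ ∀ c ∈ u, PySem.Chars.isspace c := by
    simp only [PySem.Chars.strip, PySem.Chars.rstrip, PySem.Chars.lstrip,
      List.reverse_eq_nil_iff, List.dropWhile_eq_nil_iff, List.mem_reverse]
    constructor
    · intro H c hc
      by_cases hsp : PySem.Chars.isspace c
      · exact hsp
      · rcases (List.mem_append.1 (by rw [List.takeWhile_append_dropWhile (p := PySem.Chars.isspace)]; exact hc)) with h1 | h1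
        · exact List.mem_takeWhile_imp h1
        · exact absurd (H c h1) hsp
    · intro H c hc
      exact H c (List.Sublist.mem hc (List.dropWhile_sublist _))
  constructor
  · intro hpos
    by_contra hall
    push Not at hall
    rw [h.2 (by simpa using hall)] at hpos
    simp at hpos
  · rintro ⟨c, hc, hcs⟩ 
    rcases Nat.eq_zero_or_pos (PySem.Chars.strip u).length with h0 | h0
    · exact absurd (h.1 (List.length_eq_zero_iff.1 h0) c hc) hcs
    · exact h0

-- A's loop is an 'any' over its range
lemma pvALoop_any (ts : List Char) (i : Int) (r : List Int) :
    pvALoop ts i r = r.any (fun j =>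
      decide (PySem.List.slice ts (some i) (some j) = PySem.List.slice ts (some j) (some (j + j - i))) &&
      decide (0 < PySem.Chars.len (PySem.Chars.strip (PySem.List.slice ts (some i) (some j))))) := by
  induction r with
  | nil => simp [pvALoop]
  | cons j r ih =>
      simp only [pvALoop, List.any_cons, ← ih]
      split_ifs with h1 h2 <;> simp_all

lemma pvBLoop_any (ts : List Char) (h p : List Int) (m : Int) (r : List Int) :
    pvBLoop ts h p m r = r.any (fun j =>
      decide (PySem.Int.mod (PySem.List.pyGetD h j 0 - PySem.List.pyGetD h 0 0 * PySem.List.pyGetD p j 0) m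
         = PySem.Int.mod (PySem.List.pyGetD h (2 * j) 0 - PySem.List.pyGetD h j 0 * PySem.List.pyGetD p j 0) m) &&
      decide (PySem.List.slice ts none (some j) = PySem.List.slice ts (some j) (some (2 * j)))) := by
  induction r with
  | nil => simp [pvBLoop]
  | cons j r ih =>
      simp only [pvBLoop, List.any_cons, ← ih]
      split_ifs with h1 <;> simp_all

lemma pvBFindF_spec (ts : List Char) (a : Nat) :
    (pvBFindF ts (PySem.List.pyRange (a : Int) (ts.length : Int) 1) = -1 ∧
       ∀ k, (hk : k < ts.length) → a ≤ k → PySem.Chars.isspace (ts[k]'hk)) ∨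
    (∃ i : Nat, ∃ hi : i < ts.length, a ≤ i ∧
       pvBFindF ts (PySem.List.pyRange (a : Int) (ts.length : Int) 1) = (i : Int) ∧
       ¬ PySem.Chars.isspace (ts[i]'hi) ∧
       ∀ k, (hk : k < ts.length) → a ≤ k → k < i → PySem.Chars.isspace (ts[k]'hk)) := by
  by_cases hlt : a < ts.length
  case neg =>
    left
    rw [PySem.List.pyRange_one_eq_nil (by exact_mod_cast Nat.le_of_not_lt hlt)]
    exact ⟨rfl, fun k hk hak => absurd (lt_of_le_of_lt hak hk) hlt⟩
  case pos =>
    induction hfuel : ts.length - a generalizing a with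
    | zero => omega
    | succ fuel ih =>
      have hget : PySem.List.pyGetD ts (a : Int) ' ' = ts[a]'hlt := by
        rw [PySem.List.pyGetD_natCast, List.getD_eq_getElem?_getD, List.getElem?_eq_getElem hlt]
        rfl
      rw [PySem.List.pyRange_one_cons (by exact_mod_cast hlt)]
      simp only [pvBFindF, hget]
      by_cases hsp : PySem.Chars.isspace (ts[a]'hlt)
      · rw [if_neg (by simp [hsp])]
        have hcast : ((a : Int) + 1) = ((a + 1 : Nat) : Int) := by push_cast; ring
        rw [hcast]
        by_cases hlt2 : a + 1 < ts.length
        · rcases ih (a+1) hlt2 (by omega) with ⟨hres, hall⟩ | ⟨i, hi, hai, hres, hnsp, hmin⟩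
          · left
            refine ⟨hres, fun k hk hak => ?_⟩
            rcases Nat.eq_or_lt_of_le hak with he | hl
            · exact he ▸ hsp
            · exact hall k hk hl
          · right
            refine ⟨i, hi, by omega, hres, hnsp, fun k hk hak hki => ?_⟩
            rcases Nat.eq_or_lt_of_le hak with he | hl
            · exact he ▸ hsp
            · exact hmin k hk hl hki
        · left
          rw [PySem.List.pyRange_one_eq_nil (by exact_mod_cast Nat.le_of_not_lt hlt2)]
          refine ⟨rfl, fun k hk hak => ?_⟩
          have : k = a := by omega
          exact this ▸ hsp
      · rw [if_pos (by simp [hsp])]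
        exact Or.inr ⟨a, hlt, le_refl a, rfl, hsp, fun k hk hak hki => by omega⟩

-- normalisations of the Python slice expressions to take/drop at a Nat index
lemma pv_slice_norm (l : List Char) (k : Nat) :
    PySem.List.slice l (some ((k:Int))) (some ((k:Int) + (k:Int) - 0)) = (l.drop k).take k := by
  have h : ((k:Int) + (k:Int) - 0) = ((k + k : Nat) : Int) := by push_cast; ring
  rw [h, PySem.List.slice_natCast]
  simp

lemma pv_slice_norm2 (l : List Char) (k : Nat) :
    PySem.List.slice l (some ((k:Int))) (some (2 * (k:Int))) = (l.drop k).take k := by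
  have h : (2 * (k:Int)) = ((k + k : Nat) : Int) := by push_cast; ring
  rw [h, PySem.List.slice_natCast]
  simp

lemma pv_slice_norm0 (l : List Char) (k : Nat) :
    PySem.List.slice l (some (0:Int)) (some ((k:Int))) = l.take k := by
  have h : (0:Int) = ((0:Nat):Int) := rfl
  rw [h, PySem.List.slice_natCast]
  simp

-- ===== VERDICT (by name: the statement is the Claim_ definition above) =====
theorem exists_duplicates_spec : Claim_equal_exists_duplicates := by
  intro t _
  show exists_duplicates t = exists_duplicates_alt t
  unfold exists_duplicates exists_duplicates_alt
  dsimp only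
  set l := t.toList with hl
  set n := l.length with hn
  have hM : (0:Int) < 2305843009213693951 := by norm_num
  have h0 : ((0:Nat):Int) = (0:Int) := rfl
  rcases pvBFindF_spec l 0 with ⟨hres, hall⟩ | ⟨i, hi, _, hres, hnsp, hmin⟩
  · -- the whole string is whitespace: both sides are false
    rw [h0] at hres
    rw [hres, if_pos (by norm_num), pvALoop_any]
    apply List.any_eq_false.mpr
    intro j hj
    simp only [Bool.and_eq_true, decide_eq_true_eq, PySem.Chars.len_eq, Nat.cast_pos, not_and]
    intro _ hpos
    obtain ⟨c, hc, hcsp⟩ := (pv_strip_pos _).1 hpos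
    have hcl : c ∈ l := PySem.List.mem_of_mem_slice _ _ _ hc
    obtain ⟨k, hk, hck⟩ := List.mem_iff_getElem.mp hcl
    exact hcsp (hck ▸ hall k hk (Nat.zero_le k))
  · -- i = first non-whitespace index
    rw [h0] at hres
    rw [hres, if_neg (by omega)]
    have hbuild : pvBBuild 1000003 2305843009213693951 l ([0], [1]) =
        (0 :: pvContH 1000003 2305843009213693951 0 l,
         1 :: pvContP 1000003 2305843009213693951 1 n) := by
      have := pvBBuild_eq 1000003 2305843009213693951 l [] [] 0 1
      simpa [hn] using this
    rw [hbuild]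
    dsimp only
    rw [pvALoop_any, pvBLoop_any]
    rw [show PySem.Int.floordiv ((n:Nat):Int) 2 = ((n / 2 : Nat) : Int) from
      PySem.Int.floordiv_natCast n 2]
    apply Bool.eq_iff_iff.mpr
    rw [List.any_eq_true, List.any_eq_true]
    constructor
    · rintro ⟨j, hjmem, hj⟩
      rw [PySem.List.mem_pyRange_one] at hjmem
      obtain ⟨hj0, hjn⟩ := hjmem
      set k := j.toNat with hk
      have hjk : j = (k : Int) := (Int.toNat_of_nonneg hj0).symm
      rw [hjk] at hj hjn
      have hkn : k < n := by exact_mod_cast hjn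
      simp only [Bool.and_eq_true, decide_eq_true_eq, PySem.Chars.len_eq, Nat.cast_pos] at hj
      rw [pv_slice_norm0, pv_slice_norm] at hj
      obtain ⟨hslice, hstrip⟩ := hj
      -- some non-whitespace character sits in l.take k, so i < k
      obtain ⟨c, hc, hcsp⟩ := (pv_strip_pos _).1 hstrip
      obtain ⟨idx, hidx, hcidx⟩ := List.mem_take_iff_getElem.mp hc
      have hidxl : idx < n := by omega
      have hidxk : idx < k := by omega
      have hik : i < k := by
        by_contra hik
        exact hcsp (hcidx ▸ hmin idx hidxl (Nat.zero_le idx) (by omega))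
      -- equal slices have equal lengths, so k + k ≤ n
      have hlen := congrArg List.length hslice
      simp only [List.length_take, List.length_drop] at hlen
      have h2k : k + k ≤ n := by omega
      have hltk : (l.take k).length = k := by simp; omega
      have hltk2 : ((l.drop k).take k).length = k := by simp; omega
      refine ⟨(k : Int), ?_, ?_⟩
      · rw [PySem.List.mem_pyRange_one]
        constructor <;> [omega; (push_cast; omega)]
      · simp only [Bool.and_eq_true, decide_eq_true_eq]
        refine ⟨?_, ?_⟩
        · -- the rolling-hash filter agrees on equal slices
          rw [PySem.List.pyGetD_zero_cons]
          rw [show (2 * (k:Int)) = ((k + k : Nat) : Int) from by push_cast; ring]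
          rw [PySem.List.pyGetD_natCast, PySem.List.pyGetD_natCast, PySem.List.pyGetD_natCast]
          rw [pvContH_getD _ _ _ _ _ (by omega), pvContH_getD _ _ _ _ _ (by omega),
              pvContP_getD _ _ _ _ _ (by omega)]
          have hL := pv_sub_eq 1000003 2305843009213693951 hM [] (l.take k)
          have hR := pv_sub_eq 1000003 2305843009213693951 hM (l.take k) ((l.drop k).take k)
          rw [← List.take_add] at hR
          rw [hltk] at hL
          rw [hltk2] at hR
          simp only [List.nil_append] at hL
          have hG0 : pvG 1000003 2305843009213693951 0 ([] : List Char) = 0 := rfl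
          rw [hG0] at hL
          rw [hL, hR, ← hslice]
        · rw [PySem.List.slice_to_natCast, pv_slice_norm2]
          exact hslice
    · rintro ⟨j, hjmem, hj⟩
      rw [PySem.List.mem_pyRange_one] at hjmem
      obtain ⟨hj0, hjn⟩ := hjmem
      have hj0' : (0:Int) ≤ j := by omega
      set k := j.toNat with hk
      have hjk : j = (k : Int) := (Int.toNat_of_nonneg hj0').symm
      rw [hjk] at hj hjn hj0
      have hik : i < k := by exact_mod_cast hj0
      have hk2 : k ≤ n / 2 := by
        have : (k:Int) < ((n/2 : Nat):Int) + 1 := hjn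
        exact_mod_cast by omega
      have h2k : k + k ≤ n := by omega
      have hkn : k < n := by omega
      simp only [Bool.and_eq_true, decide_eq_true_eq] at hj
      rw [PySem.List.slice_to_natCast, pv_slice_norm2] at hj
      have hslice := hj.2
      refine ⟨(k : Int), ?_, ?_⟩
      · rw [PySem.List.mem_pyRange_one]
        constructor <;> [omega; (exact_mod_cast hkn)]
      · simp only [Bool.and_eq_true, decide_eq_true_eq, PySem.Chars.len_eq]
        rw [pv_slice_norm0, pv_slice_norm]
        refine ⟨hslice, ?_⟩
        have hpos := (pv_strip_pos (l.take k)).2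
          ⟨l[i]'hi, List.mem_take_iff_getElem.mpr ⟨i, by omega, rfl⟩, hnsp⟩
        exact_mod_cast hpos
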